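-- pv_equiv track=rewrite | github.com/miciav/linux-benchmark-lib | lb_plugins/plugins/dfaas/generator.py | generate_function_combinations
-- ===== SOURCE A (Python) =====
-- def generate_function_combinations(
--     functions: list[str], min_functions: int, max_functions: int
-- ) -> list[tuple[str, ...]]:
--     from itertools import combinations
--
--     sorted_functions = sorted(functions)
--     combos: list[tuple[str, ...]] = []
--     for size in range(min_functions, max_functions):
--         combos.extend(combinations(sorted_functions, size))
--     return combos
-- ===== SOURCE B (Python) =====
-- def generate_function_combinations(
--     functions: list[str], min_functions: int, max_functions: int
-- ) -> list[tuple[str, ...]]: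
--     fs = sorted(functions)
--     out: list[tuple[str, ...]] = []
--
--     def rec(start: int, chosen: list[str], k: int) -> None:
--         if k == 0:
--             out.append(tuple(chosen))
--             return
--         for i in range(start, len(fs) - k + 1):
--             chosen.append(fs[i])
--             rec(i + 1, chosen, k - 1)
--             chosen.pop()
--
--     for size in range(min_functions, max_functions):
--         rec(0, [], size)
--     return out
-- ===== Notes on version B (the rewrite author's own statement) =====
-- stated objective: alternative
-- what changed: Replaces the itertools.combinations library call with a hand-written recursive backtracking generator (choose an index, recurse on the suffix) that emits combinations in the same lexicographic-by-position order.
import Mathlib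
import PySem

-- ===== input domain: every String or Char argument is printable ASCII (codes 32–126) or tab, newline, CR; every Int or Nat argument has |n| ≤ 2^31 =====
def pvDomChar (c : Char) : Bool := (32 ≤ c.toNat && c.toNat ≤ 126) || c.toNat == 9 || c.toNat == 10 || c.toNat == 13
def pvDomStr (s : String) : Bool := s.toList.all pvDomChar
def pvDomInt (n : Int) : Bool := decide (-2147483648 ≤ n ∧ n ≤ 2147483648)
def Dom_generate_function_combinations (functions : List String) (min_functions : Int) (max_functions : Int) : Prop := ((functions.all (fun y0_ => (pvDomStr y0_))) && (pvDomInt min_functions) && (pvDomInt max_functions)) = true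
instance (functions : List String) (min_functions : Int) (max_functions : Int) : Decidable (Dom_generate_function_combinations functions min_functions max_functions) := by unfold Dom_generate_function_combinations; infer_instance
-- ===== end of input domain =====

-- ===== PORT A =====
-- Header: B replaces the itertools.combinations call with a hand-written recursive
-- backtracking generator over the sorted list (alternative decomposition, same cost).
-- Equivalence is about the RETURN value; neither version mutates its arguments.

-- itertools.combinations(xs, k) in lexicographic-by-position order (exact order of the library call)
def combA : List String → Nat → List (List String)
  | _, 0 => [[]]
  | [], _ + 1 => []
  | x :: xs, n + 1 => (combA xs n).map (fun c => x :: c) ++ combA xs (n + 1)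

def generate_function_combinations (functions : List String) (min_functions : Int) (max_functions : Int) : List (List String) :=
  let sorted_functions := PySem.List.sorted functions (fun x => x) false
  (PySem.List.pyRange min_functions max_functions 1).foldl
    (fun combos size => combos ++ combA sorted_functions size.toNat) []

-- ===== PORT B =====
-- Source B's rec(start, chosen, k): for i in range(start, len(fs)-k+1) choose fs[i] and recurse.
-- range(start, len(fs)-k+1) is List.range' start (fs.length + 1 - k - start) (Nat subtraction
-- matches Python's empty range when the bound is ≤ start); fs[i] is fs.getD i "" (i always in range).
def bRec (fs : List String) : Nat → Nat → List String → List (List String)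
  | 0, _, chosen => [chosen]
  | k + 1, start, chosen =>
      (List.range' start (fs.length + 1 - (k + 1) - start)).foldl
        (fun out i => out ++ bRec fs k (i + 1) (chosen ++ [fs.getD i ""])) []

def generate_function_combinations_alt (functions : List String) (min_functions : Int) (max_functions : Int) : List (List String) :=
  let fs := PySem.List.sorted functions (fun x => x) false
  (PySem.List.pyRange min_functions max_functions 1).foldl
    (fun out size => out ++ bRec fs size.toNat 0 []) []

-- ===== PRECONDITION & SPEC =====
-- A raises ValueError (combinations' r must be non-negative) when the range contains a
-- negative size, i.e. when min_functions < 0 and the range is non-empty; Pre_ excludes exactly that.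
def Pre_generate_function_combinations (functions : List String) (min_functions : Int) (max_functions : Int) : Prop :=
  0 ≤ min_functions ∨ max_functions ≤ min_functions

instance (functions : List String) (min_functions : Int) (max_functions : Int) : Decidable (Pre_generate_function_combinations functions min_functions max_functions) := by
  unfold Pre_generate_function_combinations; infer_instance

def pvWitness_generate_function_combinations : List String × Int × Int := (["b", "a", "c"], 0, 3)

def Spec_generate_function_combinations (functions : List String) (min_functions : Int) (max_functions : Int) (out : List (List String)) : Prop := out = generate_function_combinations_alt functions min_functions max_functions
instance (functions : List String) (min_functions : Int) (max_functions : Int) (out : List (List String)) : Decidable (Spec_generate_function_combinations functions min_functions max_functions out) := by unfold Spec_generate_function_combinations; infer_instance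

-- ===== CLAIM (what is proved, stated in full; the proofs are below) =====
def Claim_equal_generate_function_combinations : Prop := ∀ (functions : List String) (min_functions : Int) (max_functions : Int), Dom_generate_function_combinations functions min_functions max_functions → Pre_generate_function_combinations functions min_functions max_functions → Spec_generate_function_combinations functions min_functions max_functions (generate_function_combinations functions min_functions max_functions)

-- ===== LEMMAS AND PROOFS =====

theorem combA_eq_nil_of_lt (xs : List String) : ∀ n : Nat, xs.length < n → combA xs n = [] := by
  induction xs with
  | nil => intro n h; cases n with
    | zero => simp at h
    | succ m => rfl
  | cons x xs ih =>
      intro n h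
      cases n with
      | zero => simp at h
      | succ m =>
          simp only [combA]
          have h1 : xs.length < m := by simp at h; omega
          have h2 : xs.length < m + 1 := by omega
          rw [ih m h1, ih (m + 1) h2]; rfl

-- bRec fs k start chosen enumerates exactly combA over the suffix fs.drop start, prefixed by chosen
theorem bRec_eq (fs : List String) : ∀ (k start : Nat) (chosen : List String),
    bRec fs k start chosen = (combA (fs.drop start) k).map (fun c => chosen ++ c) := by
  intro k
  induction k with
  | zero => intro start chosen; simp [bRec, combA]
  | succ k ih =>
      -- inner induction on a bound d with fs.length ≤ start + d
      have inner : ∀ (d start : Nat) (chosen : List String), fs.length ≤ start + d →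
          bRec fs (k + 1) start chosen = (combA (fs.drop start) (k + 1)).map (fun c => chosen ++ c) := by
        intro d
        induction d with
        | zero =>
            intro start chosen hle
            have hdrop : fs.drop start = [] := List.drop_eq_nil_of_le (by omega)
            have hcnt : fs.length + 1 - (k + 1) - start = 0 := by omega
            simp only [bRec, hcnt, List.range'_zero, List.foldl_nil]
            rw [hdrop]; simp [combA]
        | succ d ihd =>
            intro start chosen hle
            by_cases hs : fs.length ≤ start
            · have hdrop : fs.drop start = [] := List.drop_eq_nil_of_le hs
              have hcnt : fs.length + 1 - (k + 1) - start = 0 := by omega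
              simp only [bRec, hcnt, List.range'_zero, List.foldl_nil]
              rw [hdrop]; simp [combA]
            · push Not at hs
              have hdrop : fs.drop start = fs[start] :: fs.drop (start + 1) :=
                (List.drop_eq_getElem_cons hs)
              by_cases hc : fs.length + 1 - (k + 1) - start = 0
              · -- range empty, but start < fs.length: drop start too short for k+1
                have hlt : (fs.drop start).length < k + 1 := by
                  simp [List.length_drop]; omega
                rw [combA_eq_nil_of_lt _ _ hlt]
                simp only [bRec, hc, List.range'_zero, List.foldl_nil, List.map_nil]
              · -- range non-empty: first index is start
                have hcnt : fs.length + 1 - (k + 1) - start = (fs.length + 1 - (k + 1) - (start + 1)) + 1 := by omega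
                have hrange : List.range' start (fs.length + 1 - (k + 1) - start) =
                    start :: List.range' (start + 1) (fs.length + 1 - (k + 1) - (start + 1)) := by
                  rw [hcnt]; rfl
                have hflat : ∀ (l : List Nat),
                    l.foldl (fun out i => out ++ bRec fs k (i + 1) (chosen ++ [fs.getD i ""])) [] =
                      l.flatMap (fun i => bRec fs k (i + 1) (chosen ++ [fs.getD i ""])) := by
                  intro l
                  have h := PySem.List.foldl_append_eq_flatMap (g := fun i => bRec fs k (i + 1) (chosen ++ [fs.getD i ""])) (l := l) (acc := [])
                  simpa using h
                have hrec : bRec fs (k + 1) (start + 1) chosen =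
                    (combA (fs.drop (start + 1)) (k + 1)).map (fun c => chosen ++ c) :=
                  ihd (start + 1) chosen (by omega)
                have hgetD : fs.getD start "" = fs[start] := List.getD_eq_getElem fs "" hs
                calc bRec fs (k + 1) start chosen
                    = (start :: List.range' (start + 1) (fs.length + 1 - (k + 1) - (start + 1))).flatMap
                        (fun i => bRec fs k (i + 1) (chosen ++ [fs.getD i ""])) := by
                      simp only [bRec]
                      rw [hflat, hrange]
                  _ = bRec fs k (start + 1) (chosen ++ [fs.getD start ""]) ++
                        (List.range' (start + 1) (fs.length + 1 - (k + 1) - (start + 1))).flatMap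
                          (fun i => bRec fs k (i + 1) (chosen ++ [fs.getD i ""])) := by
                      simp [List.flatMap_cons]
                  _ = (combA (fs.drop (start + 1)) k).map (fun c => (chosen ++ [fs[start]]) ++ c) ++
                        (combA (fs.drop (start + 1)) (k + 1)).map (fun c => chosen ++ c) := by
                      rw [ih, hgetD]
                      congr 1
                      have h2 : bRec fs (k + 1) (start + 1) chosen =
                          (List.range' (start + 1) (fs.length + 1 - (k + 1) - (start + 1))).flatMap
                            (fun i => bRec fs k (i + 1) (chosen ++ [fs.getD i ""])) := by
                        simp only [bRec]; rw [hflat]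
                      rw [← h2]; exact hrec
                  _ = (combA (fs.drop start) (k + 1)).map (fun c => chosen ++ c) := by
                      rw [hdrop]
                      simp only [combA, List.map_append, List.map_map]
                      congr 1
                      apply List.map_congr_left
                      intro c _
                      simp
      intro start chosen
      exact inner fs.length start chosen (by omega)

theorem bRec_eq_combA (fs : List String) (k : Nat) : bRec fs k 0 [] = combA fs k := by
  rw [bRec_eq]
  simp

-- ===== VERDICT (by name: the statement is the Claim_ definition above) =====
theorem generate_function_combinations_spec : Claim_equal_generate_function_combinations := by
  intro functions mn mx _ _
  unfold Spec_generate_function_combinations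
  unfold generate_function_combinations generate_function_combinations_alt
  simp only [bRec_eq_combA]
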